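-- pv_equiv track=rewrite | github.com/droberts01/Hyperloop | test/GeneratePathInPolygon.py | lattice_to_plotLattice
-- ===== SOURCE A (Python) =====
-- def lattice_to_plotLattice(lattice):
--     xValues = []
--     yValues = []
--     for latticeSlice in lattice:
--         for point in latticeSlice:
--             xValues.append(point[0])
--             yValues.append(point[1])
--     return [xValues,yValues]
-- ===== SOURCE B (Python) =====
-- def lattice_to_plotLattice(lattice):
--     points = [p for s in lattice for p in s]
--     if not points:
--         return [[], []]
--     xs, ys = zip(*((p[0], p[1]) for p in points))
--     return [list(xs), list(ys)]
-- ===== Notes on version B (the rewrite author's own statement) =====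
-- stated objective: idiomatic
-- what changed: Flattens the nested lattice once and transposes with zip(*...) instead of appending to two parallel accumulators inside nested loops.
import Mathlib
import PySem

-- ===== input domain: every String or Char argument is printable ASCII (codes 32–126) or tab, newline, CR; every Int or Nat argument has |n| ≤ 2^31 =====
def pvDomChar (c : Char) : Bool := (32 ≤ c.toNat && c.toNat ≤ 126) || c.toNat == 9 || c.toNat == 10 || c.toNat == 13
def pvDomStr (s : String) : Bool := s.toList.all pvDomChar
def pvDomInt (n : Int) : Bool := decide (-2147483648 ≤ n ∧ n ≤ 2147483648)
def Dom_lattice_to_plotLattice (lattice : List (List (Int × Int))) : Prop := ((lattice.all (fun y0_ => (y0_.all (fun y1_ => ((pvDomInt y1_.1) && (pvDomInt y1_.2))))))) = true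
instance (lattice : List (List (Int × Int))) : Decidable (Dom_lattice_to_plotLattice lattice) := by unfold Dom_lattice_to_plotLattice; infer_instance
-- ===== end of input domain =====

-- B flattens the lattice once and transposes (unzips) it instead of appending to two parallel accumulators.


-- ===== PORT A =====
-- nested loops appending point[0] / point[1] to two parallel accumulators
def lattice_to_plotLattice (lattice : List (List (Int × Int))) : List (List Int) :=
  let acc := lattice.foldl (fun (st : List Int × List Int) latticeSlice =>
    latticeSlice.foldl (fun (st : List Int × List Int) point =>
      (st.1 ++ [point.1], st.2 ++ [point.2])) st) ([], [])
  [acc.1, acc.2]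

-- ===== PORT B =====
-- flatten once, then unzip; the empty guard of Source B returns [[], []], which maps coincide with on []
def lattice_to_plotLattice_alt (lattice : List (List (Int × Int))) : List (List Int) :=
  let points := lattice.flatMap (fun s => s)
  if points = [] then [[], []]
  else [points.map Prod.fst, points.map Prod.snd]

-- ===== PRECONDITION & SPEC =====
def Spec_lattice_to_plotLattice (lattice : List (List (Int × Int))) (out : List (List Int)) : Prop := out = lattice_to_plotLattice_alt lattice
instance (lattice : List (List (Int × Int))) (out : List (List Int)) : Decidable (Spec_lattice_to_plotLattice lattice out) := by unfold Spec_lattice_to_plotLattice; infer_instance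

-- ===== CLAIM (what is proved, stated in full; the proofs are below) =====
def Claim_equal_lattice_to_plotLattice : Prop := ∀ (lattice : List (List (Int × Int))), Dom_lattice_to_plotLattice lattice → Spec_lattice_to_plotLattice lattice (lattice_to_plotLattice lattice)

-- ===== LEMMAS AND PROOFS =====

theorem ltp_inner (s : List (Int × Int)) (st : List Int × List Int) :
    s.foldl (fun (st : List Int × List Int) point =>
      (st.1 ++ [point.1], st.2 ++ [point.2])) st
    = (st.1 ++ s.map Prod.fst, st.2 ++ s.map Prod.snd) := by
  induction s generalizing st with
  | nil => simp
  | cons p t ih => simp [List.foldl, ih]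

theorem ltp_outer (lattice : List (List (Int × Int))) (st : List Int × List Int) :
    lattice.foldl (fun (st : List Int × List Int) latticeSlice =>
      latticeSlice.foldl (fun (st : List Int × List Int) point =>
        (st.1 ++ [point.1], st.2 ++ [point.2])) st) st
    = (st.1 ++ (lattice.flatMap (fun s => s)).map Prod.fst,
       st.2 ++ (lattice.flatMap (fun s => s)).map Prod.snd) := by
  induction lattice generalizing st with
  | nil => simp
  | cons s t ih =>
    rw [List.foldl_cons, ltp_inner, ih]
    simp

-- ===== VERDICT (by name: the statement is the Claim_ definition above) =====
theorem lattice_to_plotLattice_spec : Claim_equal_lattice_to_plotLattice := by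
  intro lattice _
  unfold Spec_lattice_to_plotLattice lattice_to_plotLattice lattice_to_plotLattice_alt
  simp only [ltp_outer]
  split
  · rename_i h; simp [h]
  · simp
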